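-- pv_equiv track=rewrite | github.com/yangj1211/mo-doc | scripts/migrate_ia_fixup.py | forward_remap
-- ===== SOURCE A (Python) =====
-- FORWARD = [
--     ("performance-tuning", "operate/performance"),
--     ("getting-started", "get-started"),
--     ("sql-reference", "reference"),
--     ("troubleshooting", "help/troubleshooting"),
--     ("overview", "concepts"),
--     ("deploy", "operate/deploy"),
--     ("maintain", "operate/maintain"),
--     ("migrate", "operate/migrate"),
--     ("security", "operate/security"),
--     ("test", "operate/test"),
--     ("tutorial", "develop/tutorials"),
--     ("faqs", "help/faqs"),
-- ]
--
-- FORWARD_FILES = [("glossary.md", "concepts/glossary.md")]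
--
-- def forward_remap(rel: str) -> str:
--     for old, new in FORWARD_FILES:
--         if rel == old:
--             return new
--     for old, new in FORWARD:
--         if rel == old:
--             return new
--         if rel.startswith(old + "/"):
--             return new + rel[len(old):]
--     return rel
-- ===== SOURCE B (Python) =====
-- FORWARD = [
--     ("performance-tuning", "operate/performance"),
--     ("getting-started", "get-started"),
--     ("sql-reference", "reference"),
--     ("troubleshooting", "help/troubleshooting"),
--     ("overview", "concepts"),
--     ("deploy", "operate/deploy"),
--     ("maintain", "operate/maintain"),
--     ("migrate", "operate/migrate"),
--     ("security", "operate/security"),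
--     ("test", "operate/test"),
--     ("tutorial", "develop/tutorials"),
--     ("faqs", "help/faqs"),
-- ]
--
-- FORWARD_FILES = [("glossary.md", "concepts/glossary.md")]
--
-- # keys of FORWARD and FORWARD_FILES are pairwise distinct, so one sorted table
-- # per branch supports binary search; a bare name consults the combined table.
-- RULES = sorted(FORWARD)
-- RULES_TOP = sorted(FORWARD + FORWARD_FILES)
--
-- def _lookup(key, rules):
--     lo, hi = 0, len(rules)
--     while lo < hi:
--         mid = (lo + hi) // 2
--         k, v = rules[mid]
--         if k == key:
--             return v
--         if k < key:
--             lo = mid + 1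
--         else:
--             hi = mid
--     return None
--
-- def forward_remap(rel: str) -> str:
--     head, sep, rest = rel.partition("/")
--     if sep:
--         v = _lookup(head, RULES)
--         return v + "/" + rest if v is not None else rel
--     v = _lookup(rel, RULES_TOP)
--     return v if v is not None else rel
-- ===== Notes on version B (the rewrite author's own statement) =====
-- stated objective: alternative
-- what changed: Replaces A's linear scans with per-rule equality and startswith prefix tests by splitting the path once at its first '/' and resolving the first segment by hand-written binary search over rule tables sorted once at module load.
import Mathlib
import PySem

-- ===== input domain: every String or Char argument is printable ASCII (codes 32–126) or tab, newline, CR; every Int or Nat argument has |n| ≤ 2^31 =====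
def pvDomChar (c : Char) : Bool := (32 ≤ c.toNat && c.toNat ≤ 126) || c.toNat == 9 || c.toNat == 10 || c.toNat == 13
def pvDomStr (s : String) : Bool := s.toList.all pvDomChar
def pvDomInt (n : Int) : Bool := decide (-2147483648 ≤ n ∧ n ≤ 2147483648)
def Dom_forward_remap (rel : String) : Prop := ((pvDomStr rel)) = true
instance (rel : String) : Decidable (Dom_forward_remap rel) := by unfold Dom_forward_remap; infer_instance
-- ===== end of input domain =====

-- B splits the path once at its first '/' and resolves the first segment by binary search
-- over rule tables sorted at module load, instead of A's linear scans with prefix tests (alternative; same exact results).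

-- module constants (shared by both implementations, as in the Python module)
def FORWARD : List (String × String) := [
  ("performance-tuning", "operate/performance"),
  ("getting-started", "get-started"),
  ("sql-reference", "reference"),
  ("troubleshooting", "help/troubleshooting"),
  ("overview", "concepts"),
  ("deploy", "operate/deploy"),
  ("maintain", "operate/maintain"),
  ("migrate", "operate/migrate"),
  ("security", "operate/security"),
  ("test", "operate/test"),
  ("tutorial", "develop/tutorials"),
  ("faqs", "help/faqs")]

def FORWARD_FILES : List (String × String) := [("glossary.md", "concepts/glossary.md")]

-- ===== PORT A =====
-- 'for old, new in FORWARD_FILES: if rel == old: return new'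
def loopFiles (rel : String) : List (String × String) → Option String
  | [] => none
  | (old, nw) :: rest => if rel = old then some nw else loopFiles rel rest

-- 'for old, new in FORWARD: …' ('old + "/"' and 'new + rel[len(old):]' are string concatenations,
-- written via String.ofList/toList so the kernel can reduce them; rel[len(old):] is PySem.Str.slice)
def loopFwd (rel : String) : List (String × String) → Option String
  | [] => none
  | (old, nw) :: rest =>
      if rel = old then some nw
      else if PySem.Str.startswith rel (String.ofList (old.toList ++ ['/'])) then
        some (String.ofList (nw.toList ++ (PySem.Str.slice rel (some (old.toList.length : Int)) none).toList))
      else loopFwd rel rest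

def forward_remap (rel : String) : String :=
  match loopFiles rel FORWARD_FILES with
  | some v => v
  | none =>
    match loopFwd rel FORWARD with
    | some v => v
    | none => rel

-- ===== PORT B =====
-- RULES = sorted(FORWARD); RULES_TOP = sorted(FORWARD + FORWARD_FILES)
-- (Python sorts the pairs lexicographically; PySem.List.sorted2 with the two components as keys is
-- exactly that; the components are compared as their char lists — Python's code-point order)
def RULES : List (String × String) :=
  PySem.List.sorted2 FORWARD (fun p => p.1.toList) (fun p => p.2.toList)
def RULES_TOP : List (String × String) :=
  PySem.List.sorted2 (FORWARD ++ FORWARD_FILES) (fun p => p.1.toList) (fun p => p.2.toList)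

-- 'while lo < hi: …' of _lookup, transliterated with a structural fuel that only makes it total
-- (the interval shrinks each iteration, so rules.length + 1 steps always suffice)
def lookupLoop (key : String) (rules : List (String × String)) : Nat → Int → Int → Option String
  | 0, _, _ => none
  | fuel + 1, lo, hi =>
      if lo < hi then
        let mid := PySem.Int.floordiv (lo + hi) 2
        match PySem.List.pyGet? rules mid with
        | none => none   -- unreachable: 0 ≤ lo ≤ mid < hi ≤ len(rules)
        | some (k, v) =>
          if k = key then some v
          else if k.toList < key.toList then lookupLoop key rules fuel (mid + 1) hi
          else lookupLoop key rules fuel lo mid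
      else none

def pyLookup (key : String) (rules : List (String × String)) : Option String :=
  lookupLoop key rules (rules.length + 1) 0 (PySem.List.len rules)

-- hand port of rel.partition("/") for the single-character separator "/" (exact: first occurrence
-- splits the string into (before, True, after); no occurrence gives (rel, False, ""))
def partSlash : List Char → List Char × Bool × List Char
  | [] => ([], false, [])
  | c :: t =>
      if c = '/' then ([], true, t)
      else
        let r := partSlash t
        (c :: r.1, r.2.1, r.2.2)

def forward_remap_alt (rel : String) : String :=
  let p := partSlash rel.toList
  if p.2.1 then
    match pyLookup (String.ofList p.1) RULES with
    | some v => String.ofList (v.toList ++ '/' :: p.2.2)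
    | none => rel
  else
    match pyLookup rel RULES_TOP with
    | some v => v
    | none => rel

-- ===== PRECONDITION & SPEC =====
def Spec_forward_remap (rel : String) (out : String) : Prop := out = forward_remap_alt rel
instance (rel : String) (out : String) : Decidable (Spec_forward_remap rel out) := by unfold Spec_forward_remap; infer_instance

-- ===== CLAIM (what is proved, stated in full; the proofs are below) =====
def Claim_equal_forward_remap : Prop := ∀ (rel : String), Dom_forward_remap rel → Spec_forward_remap rel (forward_remap rel)

-- ===== LEMMAS AND PROOFS =====

-- binary search over keys that all differ from the probe finds nothing
theorem lookupLoop_none (key : String) (rules : List (String × String))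
    (h : ∀ p ∈ rules, p.1 ≠ key) :
    ∀ (fuel : Nat) (lo hi : Int), lookupLoop key rules fuel lo hi = none := by
  intro fuel
  induction fuel with
  | zero => intro lo hi; rfl
  | succ n ih =>
      intro lo hi
      simp only [lookupLoop]
      split
      · cases hg : PySem.List.pyGet? rules (PySem.Int.floordiv (lo + hi) 2) with
        | none => rfl
        | some p =>
            obtain ⟨k, v⟩ := p
            have hk : k ≠ key := h (k, v) (PySem.List.mem_of_pyGet?_eq_some rules hg)
            simp only [if_neg hk]
            split <;> exact ih _ _
      · rfl

-- keys of the two tables, spelled out for the case split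
theorem key_cases (key : String) :
    key = "glossary.md" ∨ key = "performance-tuning" ∨ key = "getting-started" ∨
    key = "sql-reference" ∨ key = "troubleshooting" ∨ key = "overview" ∨ key = "deploy" ∨
    key = "maintain" ∨ key = "migrate" ∨ key = "security" ∨ key = "test" ∨
    key = "tutorial" ∨ key = "faqs" ∨
    (∀ p ∈ FORWARD ++ FORWARD_FILES, p.1 ≠ key) := by
  by_cases h : key ∈ (FORWARD ++ FORWARD_FILES).map Prod.fst
  · simp [FORWARD, FORWARD_FILES] at h
    tauto
  · have hne : ∀ p ∈ FORWARD ++ FORWARD_FILES, p.1 ≠ key :=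
      fun p hp hq => h (List.mem_map.mpr ⟨p, hp, hq⟩)
    tauto

-- binary search in the combined table = first-match scan of FORWARD_FILES then FORWARD
theorem lookup_top (key : String) :
    pyLookup key RULES_TOP =
      ((loopFiles key FORWARD_FILES).rec (loopFiles key FORWARD) (fun v => some v) : Option String) := by
  rcases key_cases key with h|h|h|h|h|h|h|h|h|h|h|h|h|h
  · subst h; decide
  · subst h; decide
  · subst h; decide
  · subst h; decide
  · subst h; decide
  · subst h; decide
  · subst h; decide
  · subst h; decide
  · subst h; decide
  · subst h; decide
  · subst h; decide
  · subst h; decide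
  · subst h; decide
  · have hr : ∀ p ∈ RULES_TOP, p.1 ≠ key := by
      intro p hp
      exact h p ((PySem.List.sorted2_perm _ _ _ _).mem_iff.mp hp)
    rw [pyLookup, lookupLoop_none key RULES_TOP hr]
    have hne : ∀ p ∈ FORWARD ++ FORWARD_FILES, key ≠ p.1 := fun p hp => (h p hp).symm
    simp only [FORWARD, FORWARD_FILES, List.mem_append, List.mem_cons, List.not_mem_nil,
      or_false, or_assoc, forall_eq_or_imp, forall_eq] at hne
    obtain ⟨n1, n2, n3, n4, n5, n6, n7, n8, n9, n10, n11, n12, n13⟩ := hne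
    simp [loopFiles, FORWARD, FORWARD_FILES, n1, n2, n3, n4, n5, n6, n7, n8, n9, n10, n11, n12, n13]

-- binary search in the FORWARD table = first-match scan of FORWARD
theorem lookup_fwd (key : String) :
    pyLookup key RULES = loopFiles key FORWARD := by
  rcases key_cases key with h|h|h|h|h|h|h|h|h|h|h|h|h|h
  · subst h; decide
  · subst h; decide
  · subst h; decide
  · subst h; decide
  · subst h; decide
  · subst h; decide
  · subst h; decide
  · subst h; decide
  · subst h; decide
  · subst h; decide
  · subst h; decide
  · subst h; decide
  · subst h; decide
  · have hf : ∀ p ∈ FORWARD, p.1 ≠ key := fun p hp => h p (List.mem_append_left _ hp)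
    have hr : ∀ p ∈ RULES, p.1 ≠ key := by
      intro p hp
      exact hf p ((PySem.List.sorted2_perm _ _ _ _).mem_iff.mp hp)
    rw [pyLookup, lookupLoop_none key RULES hr]
    have hne : ∀ p ∈ FORWARD, key ≠ p.1 := fun p hp => (hf p hp).symm
    simp only [FORWARD, List.mem_cons, List.not_mem_nil, or_false,
      forall_eq_or_imp, forall_eq] at hne
    obtain ⟨n1, n2, n3, n4, n5, n6, n7, n8, n9, n10, n11, n12⟩ := hne
    simp [loopFiles, FORWARD, n1, n2, n3, n4, n5, n6, n7, n8, n9, n10, n11, n12]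

theorem partSlash_false (l : List Char) (h : (partSlash l).2.1 = false) :
    (partSlash l).1 = l ∧ '/' ∉ l := by
  induction l with
  | nil => simp [partSlash]
  | cons c t ih =>
      by_cases hc : c = '/'
      · simp [partSlash, hc] at h
      · simp only [partSlash, if_neg hc] at h ⊢
        obtain ⟨h1, h2⟩ := ih h
        simp [h1, h2, Ne.symm hc]

theorem partSlash_true (l : List Char) (h : (partSlash l).2.1 = true) :
    l = (partSlash l).1 ++ '/' :: (partSlash l).2.2 ∧ '/' ∉ (partSlash l).1 := by
  induction l with
  | nil => simp [partSlash] at h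
  | cons c t ih =>
      by_cases hc : c = '/'
      · simp [partSlash, hc]
      · simp only [partSlash, if_neg hc] at h ⊢
        obtain ⟨h1, h2⟩ := ih h
        exact ⟨by simpa using congrArg (c :: ·) h1, by simp [h2, Ne.symm hc]⟩

-- a slash-free key followed by '/' is a prefix of h ++ '/' :: t (h slash-free) iff the key is h
theorem prefix_slash (a h t : List Char) (ha : '/' ∉ a) (hh : '/' ∉ h) :
    a ++ ['/'] <+: h ++ '/' :: t ↔ a = h := by
  constructor
  · intro hp
    obtain ⟨s, hs⟩ := hp
    induction a generalizing h with
    | nil =>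
        cases h with
        | nil => rfl
        | cons c h' =>
            simp at hs
            exact absurd (hs.1 ▸ List.mem_cons_self) hh
    | cons c a' ih =>
        cases h with
        | nil =>
            simp at hs
            exact absurd (hs.1 ▸ List.mem_cons_self) ha
        | cons d h' =>
            simp at hs
            obtain ⟨hcd, hrest⟩ := hs
            have := ih h' (fun hm => ha (List.mem_cons_of_mem _ hm))
              (fun hm => hh (List.mem_cons_of_mem _ hm)) (by simpa using hrest)
            simp [hcd, this]
  · rintro rfl
    exact ⟨t, by simp⟩

theorem startswith_key (rel old : String) (h t : List Char)
    (hrel : rel.toList = h ++ '/' :: t) (hh : '/' ∉ h) (hk : '/' ∉ old.toList) :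
    PySem.Chars.startswith rel.toList (old.toList ++ ['/']) = (old.toList = h : Bool) := by
  rw [hrel]
  by_cases he : old.toList = h
  · simp [he, (PySem.Chars.startswith_iff _ _).2 ((prefix_slash h h t (he ▸ hk) hh).2 rfl)]
  · simp only [he, decide_false]
    by_contra hb
    have := (PySem.Chars.startswith_iff _ _).1 (by simpa using hb)
    exact he ((prefix_slash _ _ _ hk hh).1 this)

theorem loopFiles_none_of_slash (rel : String) (hs : '/' ∈ rel.toList)
    (ps : List (String × String)) (hk : ∀ p ∈ ps, '/' ∉ p.1.toList) :
    loopFiles rel ps = none := by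
  induction ps with
  | nil => rfl
  | cons p rest ih =>
      obtain ⟨old, nw⟩ := p
      have hne : rel ≠ old := by
        intro he
        exact hk (old, nw) List.mem_cons_self (by rw [← he]; exact hs)
      simp only [loopFiles, if_neg hne]
      exact ih (fun q hq => hk q (List.mem_cons_of_mem _ hq))

theorem loopFwd_no_slash (rel : String) (hs : '/' ∉ rel.toList) (ps : List (String × String)) :
    loopFwd rel ps = loopFiles rel ps := by
  induction ps with
  | nil => rfl
  | cons p rest ih =>
      obtain ⟨old, nw⟩ := p
      have hsw : PySem.Chars.startswith rel.toList (old.toList ++ ['/']) = false := by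
        rw [Bool.eq_false_iff]
        intro hb
        obtain ⟨s, hss⟩ := (PySem.Chars.startswith_iff _ _).1 hb
        exact hs (by rw [← hss]; simp)
      simp [loopFwd, loopFiles, hsw, ih]

theorem loopFwd_slash (rel : String) (h t : List Char)
    (hrel : rel.toList = h ++ '/' :: t) (hh : '/' ∉ h)
    (ps : List (String × String)) (hk : ∀ p ∈ ps, '/' ∉ p.1.toList) :
    loopFwd rel ps =
      (loopFiles (String.ofList h) ps).map (fun nw => String.ofList (nw.toList ++ '/' :: t)) := by
  induction ps with
  | nil => rfl
  | cons p rest ih =>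
      obtain ⟨old, nw⟩ := p
      have hko : '/' ∉ old.toList := hk (old, nw) List.mem_cons_self
      have hne : rel ≠ old := by
        intro he
        exact hko (by rw [← he, hrel]; simp)
      have hsw := startswith_key rel old h t hrel hh hko
      by_cases he : old.toList = h
      · have heq : String.ofList h = old := by
          rw [← he, String.ofList_toList]
        have hsw2 : PySem.Chars.startswith rel.toList (h ++ ['/']) = true := by
          rw [← he, hsw]
          simp [he]
        have hdrop : List.drop h.length rel.toList = '/' :: t := by
          rw [hrel]
          exact List.drop_left
        simp [loopFwd, loopFiles, hne, hsw2, he, heq, hdrop]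
      · have hne2 : String.ofList h ≠ old := by
          intro hq
          exact he (by rw [← hq]; simp)
        have hsw' : PySem.Str.startswith rel (String.ofList (old.toList ++ ['/'])) = false := by
          simp [hsw, he]
        simp only [loopFwd, loopFiles, if_neg hne, if_neg hne2, hsw', Bool.false_eq_true, if_false]
        exact ih (fun q hq => hk q (List.mem_cons_of_mem _ hq))

theorem keys_no_slash : ∀ p ∈ FORWARD, '/' ∉ p.1.toList := by decide
theorem keys_files_no_slash : ∀ p ∈ FORWARD_FILES, '/' ∉ p.1.toList := by decide

-- ===== VERDICT (by name: the statement is the Claim_ definition above) =====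
theorem forward_remap_spec : Claim_equal_forward_remap := by
  intro rel _
  unfold Spec_forward_remap forward_remap forward_remap_alt
  cases hsep : (partSlash rel.toList).2.1 with
  | false =>
      obtain ⟨_, hns⟩ := partSlash_false rel.toList hsep
      rw [loopFwd_no_slash rel hns]
      simp only [hsep, Bool.false_eq_true, if_false, lookup_top]
      cases loopFiles rel FORWARD_FILES <;> cases loopFiles rel FORWARD <;> rfl
  | true =>
      obtain ⟨hdecomp, hh⟩ := partSlash_true rel.toList hsep
      have hmem : '/' ∈ rel.toList := by rw [hdecomp]; simp
      rw [loopFiles_none_of_slash rel hmem FORWARD_FILES keys_files_no_slash,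
        loopFwd_slash rel _ _ hdecomp hh FORWARD keys_no_slash]
      simp only [hsep, if_true, lookup_fwd]
      cases loopFiles (String.ofList (partSlash rel.toList).1) FORWARD <;> simp
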